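-- pv_equiv track=rewrite | github.com/angelhort/TFG_Articoding_22-23 | Web/datos/script.py | getCuantasPersonasHanAlcanzadoNivel
-- ===== SOURCE A (Python) =====
-- from collections import defaultdict
--
-- def getCuantasPersonasHanAlcanzadoNivel(ultNivelCompletado, niveles):
--     cuantosHanLlegadoAlNivel = defaultdict()
--
--     ultNivelCopia = ultNivelCompletado.copy()
--
--     #Contamos cuanta gente ha llegado hasta cada nivel
--     for nivel in niveles:
--         cuantosHanLlegadoAlNivel[nivel] = len(ultNivelCopia)
--
--         keys_to_delete = [k for k, v in ultNivelCopia.items() if v == nivel]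
--         for k in keys_to_delete:
--             del ultNivelCopia[k]
--
--     return cuantosHanLlegadoAlNivel
-- ===== SOURCE B (Python) =====
-- from collections import Counter
--
-- def getCuantasPersonasHanAlcanzadoNivel(ultNivelCompletado, niveles):
--     # One frequency table of last-completed levels, then a running remaining
--     # count: O(N + L) instead of rescanning the whole dict per level.
--     cnt = Counter(ultNivelCompletado.values())
--     restantes = len(ultNivelCompletado)
--     res = {}
--     for nivel in niveles:
--         res[nivel] = restantes
--         restantes -= cnt.pop(nivel, 0)
--     return res
-- ===== Notes on version B (the rewrite author's own statement) =====
-- stated objective: faster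
-- what changed: Instead of rescanning and deleting from a copy of the whole dict for every level, B builds one Counter of the values and keeps a running remaining count, subtracting each level's frequency once (pop makes repeated levels subtract zero, like A's already-deleted keys).
import Mathlib
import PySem

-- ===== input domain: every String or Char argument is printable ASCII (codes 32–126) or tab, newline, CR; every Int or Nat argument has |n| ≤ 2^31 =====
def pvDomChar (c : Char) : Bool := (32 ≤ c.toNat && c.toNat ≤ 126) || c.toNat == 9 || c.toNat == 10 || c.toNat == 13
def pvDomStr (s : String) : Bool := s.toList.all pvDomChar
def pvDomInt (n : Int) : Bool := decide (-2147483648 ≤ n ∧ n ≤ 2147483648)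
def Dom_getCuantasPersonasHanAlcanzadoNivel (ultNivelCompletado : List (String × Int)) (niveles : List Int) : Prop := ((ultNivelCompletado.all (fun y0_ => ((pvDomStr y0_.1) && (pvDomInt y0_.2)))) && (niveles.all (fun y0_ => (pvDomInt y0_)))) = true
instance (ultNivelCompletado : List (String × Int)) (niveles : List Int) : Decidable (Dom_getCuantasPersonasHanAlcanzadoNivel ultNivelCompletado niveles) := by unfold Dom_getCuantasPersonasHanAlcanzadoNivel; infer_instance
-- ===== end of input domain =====

-- B replaces A's per-level rescan-and-delete of a dict copy by one value-frequency
-- table and a running remaining count (measured faster; asymptotic mechanism).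

-- ===== PORT A =====
-- one iteration of A's loop body: cuantos[nivel] = len(copia); collect keys_to_delete; delete them
def pvStepA (st : PySem.Dict Int Int × PySem.Dict String Int) (nivel : Int) :
    PySem.Dict Int Int × PySem.Dict String Int :=
  let cuantos := st.1.insert nivel (st.2.size : Int)
  let keys_to_delete := (st.2.items.filter (fun kv => kv.2 == nivel)).map (fun kv => kv.1)
  (cuantos, keys_to_delete.foldl (fun c k => c.erase k) st.2)

def getCuantasPersonasHanAlcanzadoNivel (ultNivelCompletado : List (String × Int)) (niveles : List Int) : List (Int × Int) :=
  -- ultNivelCopia = ultNivelCompletado.copy()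
  (niveles.foldl pvStepA (PySem.Dict.empty, PySem.Dict.mk ultNivelCompletado)).1.items

-- ===== PORT B =====
-- one iteration of B's loop body: res[nivel] = restantes; restantes -= cnt.pop(nivel, 0)
def pvStepB (st : Int × PySem.Dict Int Int × PySem.Dict Int Int) (nivel : Int) :
    Int × PySem.Dict Int Int × PySem.Dict Int Int :=
  let res := st.2.2.insert nivel st.1
  (st.1 - st.2.1.getD nivel 0, st.2.1.erase nivel, res)

def getCuantasPersonasHanAlcanzadoNivel_alt (ultNivelCompletado : List (String × Int)) (niveles : List Int) : List (Int × Int) :=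
  let cnt := PySem.Dict.counter (ultNivelCompletado.map (fun kv => kv.2))
  (niveles.foldl pvStepB ((ultNivelCompletado.length : Int), cnt, PySem.Dict.empty)).2.2.items

-- ===== PRECONDITION & SPEC =====
-- ultNivelCompletado is a Python dict: an association list with a repeated key does not
-- represent one, so Pre_ requires distinct keys (no input the Python A accepts is
-- excluded — a dict's keys are always distinct).
def Pre_getCuantasPersonasHanAlcanzadoNivel (ultNivelCompletado : List (String × Int)) (niveles : List Int) : Prop :=
  (ultNivelCompletado.map (fun kv => kv.1)).Nodup
instance (ultNivelCompletado : List (String × Int)) (niveles : List Int) : Decidable (Pre_getCuantasPersonasHanAlcanzadoNivel ultNivelCompletado niveles) := by unfold Pre_getCuantasPersonasHanAlcanzadoNivel; infer_instance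

def pvWitness_getCuantasPersonasHanAlcanzadoNivel : (List (String × Int)) × List Int :=
  ([("ana", 1), ("bob", 2), ("eva", 2)], [1, 2, 3])

def Spec_getCuantasPersonasHanAlcanzadoNivel (ultNivelCompletado : List (String × Int)) (niveles : List Int) (out : List (Int × Int)) : Prop := out = getCuantasPersonasHanAlcanzadoNivel_alt ultNivelCompletado niveles
instance (ultNivelCompletado : List (String × Int)) (niveles : List Int) (out : List (Int × Int)) : Decidable (Spec_getCuantasPersonasHanAlcanzadoNivel ultNivelCompletado niveles out) := by unfold Spec_getCuantasPersonasHanAlcanzadoNivel; infer_instance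

-- ===== CLAIM (what is proved, stated in full; the proofs are below) =====
def Claim_equal_getCuantasPersonasHanAlcanzadoNivel : Prop := ∀ (ultNivelCompletado : List (String × Int)) (niveles : List Int), Dom_getCuantasPersonasHanAlcanzadoNivel ultNivelCompletado niveles → Pre_getCuantasPersonasHanAlcanzadoNivel ultNivelCompletado niveles → Spec_getCuantasPersonasHanAlcanzadoNivel ultNivelCompletado niveles (getCuantasPersonasHanAlcanzadoNivel ultNivelCompletado niveles)

-- ===== LEMMAS AND PROOFS =====

-- folding `erase` over a list of keys filters the items by key membership
lemma pv_fold_erase (K : List String) (l : List (String × Int)) :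
    K.foldl (fun (c : PySem.Dict String Int) k => c.erase k) (PySem.Dict.mk l)
      = PySem.Dict.mk (l.filter (fun p => !(K.contains p.1))) := by
  induction K generalizing l with
  | nil => simp
  | cons k K ih =>
    rw [List.foldl_cons]
    have he : (PySem.Dict.mk l).erase k = PySem.Dict.mk (l.filter (fun p => !(p.1 == k))) := rfl
    rw [he, ih, List.filter_filter]
    congr 1
    apply List.filter_congr
    intro p _
    by_cases h : p.1 = k <;> simp [h]

-- with distinct keys, deleting the keys of the pairs whose value is `nivel`
-- is the same as filtering the pairs by value
lemma pv_erase_step (l : List (String × Int)) (h : (l.map (fun kv => kv.1)).Nodup) (nivel : Int) :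
    ((l.filter (fun kv => kv.2 == nivel)).map (fun kv => kv.1)).foldl
        (fun (c : PySem.Dict String Int) k => c.erase k) (PySem.Dict.mk l)
      = PySem.Dict.mk (l.filter (fun p => !(p.2 == nivel))) := by
  rw [pv_fold_erase]
  congr 1
  apply List.filter_congr
  intro p hp
  by_cases hpv : p.2 = nivel
  · have hm : p.1 ∈ (l.filter (fun kv => kv.2 == nivel)).map (fun kv => kv.1) :=
      List.mem_map_of_mem (List.mem_filter.2 ⟨hp, by simp [hpv]⟩)
    simp [hpv, hm]
  · have hnm : p.1 ∉ (l.filter (fun kv => kv.2 == nivel)).map (fun kv => kv.1) := by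
      intro hmem
      obtain ⟨q, hqf, hq1⟩ := List.mem_map.1 hmem
      obtain ⟨hql, hq2⟩ := List.mem_filter.1 hqf
      have : q = p := List.inj_on_of_nodup_map h hql hp hq1
      subst this
      exact hpv (by simpa using hq2)
    simp [hpv, hnm]

lemma pv_getD_erase (d : PySem.Dict Int Int) (k v : Int) :
    (d.erase k).getD v 0 = if v = k then 0 else d.getD v 0 := by
  obtain ⟨l⟩ := d
  induction l with
  | nil => simp [PySem.Dict.erase, PySem.Dict.getD, PySem.Dict.get?]
  | cons p rest ih =>
    obtain ⟨k1, v1⟩ := p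
    have he : (PySem.Dict.mk ((k1, v1) :: rest)).erase k
        = PySem.Dict.mk (((k1, v1) :: rest).filter (fun p => !(p.1 == k))) := rfl
    rw [he, List.filter_cons]
    by_cases hp : k1 = k <;> by_cases hv : v = k <;>
      simp_all [PySem.Dict.getD, PySem.Dict.get?_mk_cons, PySem.Dict.erase, beq_iff_eq] <;>
      split_ifs <;> simp_all

lemma pv_count_filter_values (l : List (String × Int)) (nivel v : Int) :
    ((l.filter (fun p => !(p.2 == nivel))).map (fun kv => kv.2)).count v
      = if v = nivel then 0 else (l.map (fun kv => kv.2)).count v := by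
  induction l with
  | nil => simp
  | cons p rest ih =>
    simp only [List.filter_cons, List.map_cons]
    by_cases hv : v = nivel <;> by_cases hp : p.2 = nivel <;>
      simp_all [List.count_cons] <;> omega

lemma pv_length_filter_values (l : List (String × Int)) (nivel : Int) :
    ((l.filter (fun p => !(p.2 == nivel))).length : Int)
      = (l.length : Int) - ((l.map (fun kv => kv.2)).count nivel : Int) := by
  induction l with
  | nil => simp
  | cons p rest ih =>
    simp only [List.filter_cons, List.map_cons, List.count_cons]
    by_cases hp : p.2 = nivel <;> simp_all <;> push_cast <;> omega

-- the loop invariant: both loops build the same result dict, while B's running count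
-- equals len(copia) and B's counter counts copia's values
lemma pv_loop (niveles : List Int) :
    ∀ (copia : List (String × Int)) (res : PySem.Dict Int Int) (cnt : PySem.Dict Int Int),
      (copia.map (fun kv => kv.1)).Nodup →
      (∀ v, cnt.getD v 0 = ((copia.map (fun kv => kv.2)).count v : Int)) →
      (niveles.foldl pvStepA (res, PySem.Dict.mk copia)).1
        = (niveles.foldl pvStepB ((copia.length : Int), cnt, res)).2.2 := by
  induction niveles with
  | nil => intro copia res cnt _ _; rfl
  | cons nivel rest ih =>
    intro copia res cnt hnd hcnt
    rw [List.foldl_cons, List.foldl_cons]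
    have hA : pvStepA (res, PySem.Dict.mk copia) nivel
        = (res.insert nivel (copia.length : Int),
           PySem.Dict.mk (copia.filter (fun p => !(p.2 == nivel)))) := by
      unfold pvStepA
      refine Prod.ext rfl ?_
      exact pv_erase_step copia hnd nivel
    have hB : pvStepB ((copia.length : Int), cnt, res) nivel
        = (((copia.filter (fun p => !(p.2 == nivel))).length : Int),
           cnt.erase nivel, res.insert nivel (copia.length : Int)) := by
      unfold pvStepB
      refine Prod.ext ?_ rfl
      simp only [pv_length_filter_values, hcnt]
    rw [hA, hB]
    refine ih _ _ _ ?_ ?_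
    · exact List.Nodup.sublist (List.Sublist.map _ List.filter_sublist) hnd
    · intro v
      rw [pv_getD_erase, pv_count_filter_values]
      by_cases hv : v = nivel <;> simp [hv, hcnt]

-- ===== VERDICT (by name: the statement is the Claim_ definition above) =====
theorem getCuantasPersonasHanAlcanzadoNivel_spec : Claim_equal_getCuantasPersonasHanAlcanzadoNivel := by
  intro u niveles _ hpre
  unfold Spec_getCuantasPersonasHanAlcanzadoNivel
  unfold getCuantasPersonasHanAlcanzadoNivel getCuantasPersonasHanAlcanzadoNivel_alt
  exact congrArg PySem.Dict.items
    (pv_loop niveles u PySem.Dict.empty _ hpre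
      (fun v => by simpa using PySem.Dict.getD_counter (u.map (fun kv => kv.2)) v))
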